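-- pv_equiv track=rewrite | github.com/markqiu/red_blud_eyes | src/knowledge.py | build_nested_knowledge_string
-- ===== SOURCE A (Python) =====
-- def build_nested_knowledge_string(level: int) -> str:
--     """
--     构建嵌套知识的字符串表示
--
--     例如：
--     - level=0: "存在红眼睛"
--     - level=1: "所有人都知道存在红眼睛"
--     - level=2: "所有人都知道(所有人都知道存在红眼睛)"
--     """
--     base = "存在红眼睛"
--     if level == 0:
--         return base
--
--     result = base
--     for _ in range(level):
--         result = f"所有人都知道({result})"
--     return result
-- ===== SOURCE B (Python) =====
-- def build_nested_knowledge_string(level: int) -> str: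
--     base = "存在红眼睛"
--     return "所有人都知道(" * level + base + ")" * level
-- ===== Notes on version B (the rewrite author's own statement) =====
-- stated objective: faster
-- what changed: Replaced the loop that re-wraps the whole string level times with a direct construction prefix*level + base + ")"*level.
import Mathlib
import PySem

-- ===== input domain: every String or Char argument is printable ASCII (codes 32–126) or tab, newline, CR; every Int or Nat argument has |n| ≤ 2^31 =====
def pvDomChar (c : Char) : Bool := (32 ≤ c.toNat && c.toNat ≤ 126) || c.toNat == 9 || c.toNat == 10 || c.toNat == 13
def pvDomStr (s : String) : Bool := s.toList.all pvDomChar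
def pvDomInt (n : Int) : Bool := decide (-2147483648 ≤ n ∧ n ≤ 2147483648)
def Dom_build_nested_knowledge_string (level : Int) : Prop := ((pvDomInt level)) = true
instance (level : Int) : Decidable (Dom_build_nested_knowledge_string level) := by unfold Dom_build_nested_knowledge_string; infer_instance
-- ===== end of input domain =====

-- B replaces A's repeated whole-string rewrapping loop with a direct
-- prefix*level + base + ")"*level construction (objective: faster, O(level) vs O(level^2)).

-- ===== PORT A =====
-- A: if level == 0 return base; else wrap 'result' level times in a loop over range(level).
-- Strings are ported through List Char (PySem convention); concatenation is list append.
def build_nested_knowledge_string (level : Int) : String :=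
  let base := "存在红眼睛".toList
  if level = 0 then String.ofList base
  else
    String.ofList ((PySem.List.pyRange 0 level 1).foldl
      (fun r _ => "所有人都知道(".toList ++ r ++ ")".toList) base)

-- ===== PORT B =====
-- B: direct construction; str * n is PySem.List.pyRepeat on the character list.
def build_nested_knowledge_string_alt (level : Int) : String :=
  String.ofList (PySem.List.pyRepeat "所有人都知道(".toList level
             ++ "存在红眼睛".toList
             ++ PySem.List.pyRepeat ")".toList level)

-- ===== PRECONDITION & SPEC =====
def Spec_build_nested_knowledge_string (level : Int) (out : String) : Prop := out = build_nested_knowledge_string_alt level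
instance (level : Int) (out : String) : Decidable (Spec_build_nested_knowledge_string level out) := by unfold Spec_build_nested_knowledge_string; infer_instance

-- ===== CLAIM (what is proved, stated in full; the proofs are below) =====
def Claim_equal_build_nested_knowledge_string : Prop := ∀ (level : Int), Dom_build_nested_knowledge_string level → Spec_build_nested_knowledge_string level (build_nested_knowledge_string level)

-- ===== LEMMAS AND PROOFS =====
-- Wrapping n times equals n copies of the prefix, the seed, n copies of the suffix.
theorem flat_comm (n : Nat) (x : List Char) :
    (List.replicate n x).flatten ++ x = x ++ (List.replicate n x).flatten := by
  calc (List.replicate n x).flatten ++ x = (List.replicate n x ++ [x]).flatten := by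
        simp
    _ = (List.replicate (n+1) x).flatten := by rw [List.replicate_succ']
    _ = x ++ (List.replicate n x).flatten := by rw [List.replicate_succ]; simp

theorem foldl_wrap (pre close : List Char) (l : List Int) (s : List Char) :
    l.foldl (fun r _ => pre ++ r ++ close) s
      = (List.replicate l.length pre).flatten ++ s ++ (List.replicate l.length close).flatten := by
  induction l generalizing s with
  | nil => simp
  | cons a l ih =>
      simp only [List.foldl_cons, List.length_cons, List.replicate_succ, List.flatten_cons]
      rw [ih]
      simp only [← List.append_assoc]
      rw [flat_comm]

-- ===== VERDICT (by name: the statement is the Claim_ definition above) =====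
theorem build_nested_knowledge_string_spec : Claim_equal_build_nested_knowledge_string := by
  intro level _
  unfold Spec_build_nested_knowledge_string build_nested_knowledge_string
    build_nested_knowledge_string_alt
  by_cases h : level = 0
  · subst h
    simp [PySem.List.pyRepeat]
  · simp only [if_neg h, foldl_wrap, PySem.List.pyRepeat,
      PySem.List.length_pyRange_one, Int.sub_zero]
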